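-- pv_equiv track=rewrite | github.com/horsnel/menshly-global-repo | scripts/generate_opportunity.py | strip_h1
-- ===== SOURCE A (Python) =====
-- def strip_h1(body: str) -> str:
--     """Remove the H1 title line from the body (it goes into frontmatter)."""
--     lines = body.split("\n")
--     filtered = []
--     skipped_h1 = False
--     for line in lines:
--         if not skipped_h1 and line.strip().startswith("# ") and not line.strip().startswith("## "):
--             skipped_h1 = True
--             continue
--         filtered.append(line)
--     return "\n".join(filtered)
-- ===== SOURCE B (Python) =====
-- def strip_h1(body: str) -> str:
--     """Remove the H1 title line from the body (it goes into frontmatter)."""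
--     lines = body.split("\n")
--     for i, line in enumerate(lines):
--         s = line.strip()
--         if s.startswith("# ") and not s.startswith("## "):
--             return "\n".join(lines[:i] + lines[i + 1:])
--     return body
-- ===== Notes on version B (the rewrite author's own statement) =====
-- stated objective: simpler
-- what changed: Replaces the flag-guarded filter-accumulate loop with find-the-first-H1-index then slice-and-rejoin, returning the original string untouched when no H1 line exists.
import Mathlib
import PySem

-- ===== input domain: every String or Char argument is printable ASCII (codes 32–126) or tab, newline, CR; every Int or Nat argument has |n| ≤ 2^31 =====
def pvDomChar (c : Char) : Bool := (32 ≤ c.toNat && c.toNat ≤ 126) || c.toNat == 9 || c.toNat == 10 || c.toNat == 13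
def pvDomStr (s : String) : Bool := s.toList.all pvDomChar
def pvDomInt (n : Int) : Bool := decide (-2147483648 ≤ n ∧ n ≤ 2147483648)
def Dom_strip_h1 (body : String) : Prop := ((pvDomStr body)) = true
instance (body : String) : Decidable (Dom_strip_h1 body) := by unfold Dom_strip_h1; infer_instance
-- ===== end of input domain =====

-- B replaces A's flag-guarded filter loop with find-first-H1-index then slice-and-rejoin,
-- returning the original string untouched when no H1 line exists (objective: simpler; same cost).

-- ===== PORT A =====
-- the loop's condition: line.strip().startswith("# ") and not line.strip().startswith("## ")
def pvIsH1 (line : List Char) : Bool :=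
  PySem.Chars.startswith (PySem.Chars.strip line) ['#', ' '] &&
    !(PySem.Chars.startswith (PySem.Chars.strip line) ['#', '#', ' '])

-- A's for-loop over lines with state (filtered, skipped_h1)
def pvLoopA (lines : List (List Char)) (filtered : List (List Char)) (skipped : Bool) :
    List (List Char) :=
  match lines with
  | [] => filtered
  | line :: rest =>
    if !skipped && pvIsH1 line then pvLoopA rest filtered true
    else pvLoopA rest (filtered ++ [line]) skipped

def strip_h1 (body : String) : String :=
  String.ofList (PySem.Chars.join ['\n']
    (pvLoopA (PySem.Chars.splitOn body.toList ['\n']) [] false))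

-- ===== PORT B =====
def strip_h1_alt (body : String) : String :=
  let lines := PySem.Chars.splitOn body.toList ['\n']
  match lines.findIdx? pvIsH1 with
  | some i => String.ofList (PySem.Chars.join ['\n'] (lines.take i ++ lines.drop (i + 1)))
  | none => body

-- ===== PRECONDITION & SPEC =====
def Spec_strip_h1 (body : String) (out : String) : Prop := out = strip_h1_alt body
instance (body : String) (out : String) : Decidable (Spec_strip_h1 body out) := by unfold Spec_strip_h1; infer_instance

-- ===== CLAIM (what is proved, stated in full; the proofs are below) =====
def Claim_equal_strip_h1 : Prop := ∀ (body : String), Dom_strip_h1 body → Spec_strip_h1 body (strip_h1 body)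

-- ===== LEMMAS AND PROOFS =====
-- once skipped_h1 is set, A's loop appends every remaining line
theorem pvLoopA_true (lines acc : List (List Char)) : pvLoopA lines acc true = acc ++ lines := by
  induction lines generalizing acc with
  | nil => simp [pvLoopA]
  | cons l rest ih => simp [pvLoopA, ih]

-- A's loop (flag unset) removes exactly the first matching line
theorem pvLoopA_false (lines acc : List (List Char)) :
    pvLoopA lines acc false =
      acc ++ (match lines.findIdx? pvIsH1 with
              | some i => lines.take i ++ lines.drop (i + 1)
              | none => lines) := by
  induction lines generalizing acc with
  | nil => simp [pvLoopA]
  | cons l rest ih =>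
    by_cases h : pvIsH1 l
    · simp [pvLoopA, h, pvLoopA_true, List.findIdx?_cons]
    · simp [pvLoopA, h, ih, List.findIdx?_cons]
      cases hf : rest.findIdx? pvIsH1 <;> simp

-- reference splitter: split on '\n' with an explicit reversed-accumulator, no fuel
def pvSplitN : List Char → List Char → List (List Char)
  | [], cur => [cur.reverse]
  | c :: rest, cur =>
    if c = '\n' then cur.reverse :: pvSplitN rest [] else pvSplitN rest (c :: cur)

theorem pvSplitN_ne_nil (l cur : List Char) : pvSplitN l cur ≠ [] := by
  induction l generalizing cur with
  | nil => simp [pvSplitN]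
  | cons c rest ih => by_cases h : c = '\n' <;> simp [pvSplitN, h, ih]

theorem pvSplitOn_go_eq (fuel : Nat) (l cur : List Char) (acc : List (List Char))
    (h : l.length < fuel) :
    PySem.Chars.splitOn.go ['\n'] fuel l cur acc = acc.reverse ++ pvSplitN l cur := by
  induction fuel generalizing l cur acc with
  | zero => omega
  | succ fuel ih =>
    cases l with
    | nil => simp [PySem.Chars.splitOn.go, pvSplitN]
    | cons c rest =>
      by_cases hc : c = '\n'
      · subst hc
        simp only [PySem.Chars.splitOn.go, List.isPrefixOf]
        simp [ih rest [] _ (by simpa using Nat.lt_of_succ_lt_succ h), pvSplitN]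
      · simp only [PySem.Chars.splitOn.go]
        have : (['\n'].isPrefixOf (c :: rest)) = false := by
          simp [List.isPrefixOf]; exact fun hh => (hc hh.symm).elim
        rw [this]
        simp [ih rest (c :: cur) acc (by simpa using Nat.lt_of_succ_lt_succ h), pvSplitN, hc]

theorem pvSplitOn_eq (cs : List Char) :
    PySem.Chars.splitOn cs ['\n'] = pvSplitN cs [] := by
  unfold PySem.Chars.splitOn
  simpa using pvSplitOn_go_eq (cs.length + 1) cs [] [] (by omega)

theorem pvJoin_pvSplitN (l cur : List Char) :
    PySem.Chars.join ['\n'] (pvSplitN l cur) = cur.reverse ++ l := by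
  induction l generalizing cur with
  | nil => simp [pvSplitN, PySem.Chars.join, List.intercalate]
  | cons c rest ih =>
    by_cases h : c = '\n'
    · subst h
      obtain ⟨y, ys, hy⟩ := List.exists_cons_of_ne_nil (pvSplitN_ne_nil rest [])
      have hstep : ['\n'].intercalate (cur.reverse :: y :: ys) =
          cur.reverse ++ '\n' :: ['\n'].intercalate (y :: ys) := by
        simp [List.intercalate, List.intersperse]
      have hrest := ih (cur := [])
      simp only [hy, PySem.Chars.join, List.reverse_nil, List.nil_append] at hrest
      simp [pvSplitN, hy, PySem.Chars.join, hstep, hrest]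
    · simp only [pvSplitN, if_neg h]
      rw [ih]
      simp

-- "\n".join(body.split("\n")) == body
theorem pv_join_splitOn (cs : List Char) :
    PySem.Chars.join ['\n'] (PySem.Chars.splitOn cs ['\n']) = cs := by
  rw [pvSplitOn_eq]
  simpa using pvJoin_pvSplitN cs []

-- ===== VERDICT (by name: the statement is the Claim_ definition above) =====
theorem strip_h1_spec : Claim_equal_strip_h1 := by
  intro body _
  unfold Spec_strip_h1 strip_h1 strip_h1_alt
  rw [pvLoopA_false]
  cases hf : (PySem.Chars.splitOn body.toList ['\n']).findIdx? pvIsH1 with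
  | some i => simp [hf]
  | none =>
    simp only [hf, List.nil_append]
    rw [pv_join_splitOn, String.ofList_toList]
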